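-- pv_equiv track=rewrite | github.com/eytree/trace-scope | tools/ast_aware_merger.py | _skip_to_endif
-- ===== SOURCE A (Python) =====
-- from typing import List, Dict
--
-- def _skip_to_endif(lines: List[str], start_idx: int) -> int:
--     """Skip to matching #endif"""
--     depth = 1
--     i = start_idx + 1
--
--     while i < len(lines) and depth > 0:
--         line = lines[i].strip()
--         if line.startswith('#if'):
--             depth += 1
--         elif line.startswith('#endif'):
--             depth -= 1
--         i += 1
--
--     return i
-- ===== SOURCE B (Python) =====
-- def _skip_to_endif(lines, start_idx):
--     """Skip to matching #endif (recursion over nested block structure, no depth counter)."""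
--     i = start_idx + 1
--     while i < len(lines):
--         line = lines[i].strip()
--         if line.startswith('#endif'):
--             return i + 1
--         if line.startswith('#if'):
--             i = _skip_to_endif(lines, i)
--         else:
--             i += 1
--     return i
-- ===== Notes on version B (the rewrite author's own statement) =====
-- stated objective: alternative
-- what changed: Replaces A's single while-loop with an explicit integer depth counter by direct recursion over the nested block structure: on an inner '#if' B recursively skips that whole block and resumes after it, so no depth variable exists.
import Mathlib
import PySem

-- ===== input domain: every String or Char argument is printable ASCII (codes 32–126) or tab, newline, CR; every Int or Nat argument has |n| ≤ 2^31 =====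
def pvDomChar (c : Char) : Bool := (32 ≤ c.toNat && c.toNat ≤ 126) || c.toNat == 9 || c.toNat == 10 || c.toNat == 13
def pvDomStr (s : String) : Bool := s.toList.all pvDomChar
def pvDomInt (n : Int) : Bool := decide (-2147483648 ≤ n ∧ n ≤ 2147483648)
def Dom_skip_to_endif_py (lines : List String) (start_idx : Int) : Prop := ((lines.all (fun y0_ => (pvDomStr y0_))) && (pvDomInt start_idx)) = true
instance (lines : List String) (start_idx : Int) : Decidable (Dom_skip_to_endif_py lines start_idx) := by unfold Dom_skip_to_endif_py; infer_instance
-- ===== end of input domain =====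

-- B replaces A's iterative depth counter by recursion over the nested block structure (alternative decomposition, same cost).

-- ===== PORT A =====
-- A's while loop over state (i, depth); on an out-of-range lines[i] Python raises IndexError
-- (excluded by Pre_), the port returns i there.
def skipLoopA (lines : List String) (i : Int) (depth : Int) : Int :=
  if _h : i < (lines.length : Int) ∧ 0 < depth then
    match PySem.List.pyGet? lines i with
    | none => i
    | some s =>
      skipLoopA lines (i + 1)
        (if PySem.Str.startswith (PySem.Str.strip s) "#if" then depth + 1
         else if PySem.Str.startswith (PySem.Str.strip s) "#endif" then depth - 1
         else depth)
  else i
termination_by ((lines.length : Int) - i).toNat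
decreasing_by omega

def skip_to_endif_py (lines : List String) (start_idx : Int) : Int :=
  skipLoopA lines (start_idx + 1) 1

-- ===== PORT B =====
-- Source B's recursive scan; the fuel only makes the recursion structurally total (the chain of call
-- arguments is strictly increasing and bounded by the list length, so inside Pre_ the fuel never
-- runs out). On an out-of-range lines[i] Python raises IndexError (excluded by Pre_); the
-- port returns i there.
def skipGoB (lines : List String) : Nat → Int → Int
  | 0, i => i
  | f + 1, i =>
    if i < (lines.length : Int) then
      match PySem.List.pyGet? lines i with
      | none => i
      | some s =>
        if PySem.Str.startswith (PySem.Str.strip s) "#endif" then i + 1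
        else if PySem.Str.startswith (PySem.Str.strip s) "#if" then
          skipGoB lines f (skipGoB lines f (i + 1))
        else skipGoB lines f (i + 1)
    else i

def skip_to_endif_py_alt (lines : List String) (start_idx : Int) : Int :=
  skipGoB lines (2 * lines.length + 2) (start_idx + 1)

-- ===== PRECONDITION & SPEC =====
-- Pre_ excludes exactly the inputs on which Python A raises IndexError: start_idx + 1 < -len(lines)
-- (the first subscript lines[start_idx+1] is below the negative-wraparound range).
def Pre_skip_to_endif_py (lines : List String) (start_idx : Int) : Prop :=
  -(lines.length : Int) ≤ start_idx + 1
instance (lines : List String) (start_idx : Int) : Decidable (Pre_skip_to_endif_py lines start_idx) := by unfold Pre_skip_to_endif_py; infer_instance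

def pvWitness_skip_to_endif_py : List String × Int := (["#if A", "x", "#endif", "y"], 0)

def Spec_skip_to_endif_py (lines : List String) (start_idx : Int) (out : Int) : Prop := out = skip_to_endif_py_alt lines start_idx
instance (lines : List String) (start_idx : Int) (out : Int) : Decidable (Spec_skip_to_endif_py lines start_idx out) := by unfold Spec_skip_to_endif_py; infer_instance

-- ===== CLAIM (what is proved, stated in full; the proofs are below) =====
def Claim_equal_skip_to_endif_py : Prop := ∀ (lines : List String) (start_idx : Int), Dom_skip_to_endif_py lines start_idx → Pre_skip_to_endif_py lines start_idx → Spec_skip_to_endif_py lines start_idx (skip_to_endif_py lines start_idx)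

-- ===== LEMMAS AND PROOFS =====

theorem startswith_disj (l : String) (h : PySem.Str.startswith l "#endif" = true) :
    PySem.Str.startswith l "#if" = false := by
  by_contra hc
  simp only [Bool.not_eq_false] at hc
  simp only [PySem.Str.startswith] at h hc
  have p1 := List.isPrefixOf_iff_prefix.mp hc
  have p2 := List.isPrefixOf_iff_prefix.mp h
  obtain ⟨t1, ht1⟩ := p1
  obtain ⟨t2, ht2⟩ := p2
  have e1 : "#if".toList = ['#','i','f'] := by decide
  have e2 : "#endif".toList = ['#','e','n','d','i','f'] := by decide
  rw [e1] at ht1; rw [e2] at ht2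
  rw [← ht2] at ht1
  simp at ht1

theorem skipLoopA_of_nonpos (lines : List String) (i depth : Int) (h : depth ≤ 0) :
    skipLoopA lines i depth = i := by
  unfold skipLoopA
  rw [dif_neg]; omega

theorem skipLoopA_of_ge (lines : List String) (i depth : Int) (h : (lines.length : Int) ≤ i) :
    skipLoopA lines i depth = i := by
  unfold skipLoopA
  rw [dif_neg]; omega

theorem skipLoopA_step_none (lines : List String) (i depth : Int)
    (h : i < (lines.length : Int) ∧ 0 < depth) (hg : PySem.List.pyGet? lines i = none) :
    skipLoopA lines i depth = i := by
  conv_lhs => rw [skipLoopA]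
  rw [dif_pos h, hg]

theorem skipLoopA_step_some (lines : List String) (i depth : Int) (s : String)
    (h : i < (lines.length : Int) ∧ 0 < depth) (hg : PySem.List.pyGet? lines i = some s) :
    skipLoopA lines i depth = skipLoopA lines (i + 1)
      (if PySem.Str.startswith (PySem.Str.strip s) "#if" then depth + 1
       else if PySem.Str.startswith (PySem.Str.strip s) "#endif" then depth - 1
       else depth) := by
  conv_lhs => rw [skipLoopA]
  rw [dif_pos h, hg]

theorem skipLoopA_ge (lines : List String) (i depth : Int) : i ≤ skipLoopA lines i depth := by
  unfold skipLoopA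
  split
  · rename_i h
    match hg : PySem.List.pyGet? lines i with
    | none => simp
    | some s =>
      simp only
      have := skipLoopA_ge lines (i + 1)
        (if PySem.Str.startswith (PySem.Str.strip s) "#if" then depth + 1
         else if PySem.Str.startswith (PySem.Str.strip s) "#endif" then depth - 1
         else depth)
      omega
  · omega
termination_by ((lines.length : Int) - i).toNat
decreasing_by omega

-- depth-shift lemma: running from depth d+1 is "skip one block, then run from depth d"
theorem skipLoopA_succ (lines : List String) (i d : Int) (hd : 0 ≤ d) :
    skipLoopA lines i (d + 1) = skipLoopA lines (skipLoopA lines i 1) d := by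
  by_cases hi : i < (lines.length : Int)
  · match hg : PySem.List.pyGet? lines i with
    | none =>
      rw [skipLoopA_step_none lines i (d + 1) ⟨hi, by omega⟩ hg,
          skipLoopA_step_none lines i 1 ⟨hi, by omega⟩ hg]
      by_cases hd0 : 0 < d
      · rw [skipLoopA_step_none lines i d ⟨hi, hd0⟩ hg]
      · rw [skipLoopA_of_nonpos lines i d (by omega)]
    | some s =>
      rw [skipLoopA_step_some lines i (d + 1) s ⟨hi, by omega⟩ hg,
          skipLoopA_step_some lines i 1 s ⟨hi, by omega⟩ hg]
      by_cases h1 : PySem.Str.startswith (PySem.Str.strip s) "#if" = true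
      · rw [if_pos h1, if_pos h1]
        have e1 : skipLoopA lines (i + 1) (1 + 1) = skipLoopA lines (skipLoopA lines (i + 1) 1) 1 :=
          skipLoopA_succ lines (i + 1) 1 (by omega)
        have e2 : skipLoopA lines (i + 1) (d + 1 + 1) =
            skipLoopA lines (skipLoopA lines (i + 1) 1) (d + 1) :=
          skipLoopA_succ lines (i + 1) (d + 1) (by omega)
        have hj : i + 1 ≤ skipLoopA lines (i + 1) 1 := skipLoopA_ge lines (i + 1) 1
        have e3 : skipLoopA lines (skipLoopA lines (i + 1) 1) (d + 1) =
            skipLoopA lines (skipLoopA lines (skipLoopA lines (i + 1) 1) 1) d := by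
          by_cases hjl : skipLoopA lines (i + 1) 1 < (lines.length : Int)
          · exact skipLoopA_succ lines (skipLoopA lines (i + 1) 1) d hd
          · rw [skipLoopA_of_ge lines (skipLoopA lines (i + 1) 1) 1 (by omega),
                skipLoopA_of_ge lines (skipLoopA lines (i + 1) 1) (d + 1) (by omega),
                skipLoopA_of_ge lines (skipLoopA lines (i + 1) 1) d (by omega)]
        rw [e2, e3, ← e1]
      · rw [if_neg h1, if_neg h1]
        by_cases h2 : PySem.Str.startswith (PySem.Str.strip s) "#endif" = true
        · rw [if_pos h2, if_pos h2, (by omega : d + 1 - 1 = d), (by omega : (1 : Int) - 1 = 0),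
              skipLoopA_of_nonpos lines (i + 1) 0 le_rfl]
        · rw [if_neg h2, if_neg h2]
          exact skipLoopA_succ lines (i + 1) d hd
  · rw [skipLoopA_of_ge lines i 1 (by omega),
        skipLoopA_of_ge lines i (d + 1) (by omega),
        skipLoopA_of_ge lines i d (by omega)]
termination_by ((lines.length : Int) - i).toNat
decreasing_by all_goals omega

set_option maxHeartbeats 1000000 in
theorem skipGoB_eq (lines : List String) (f : Nat) (i : Int)
    (hf : (lines.length : Int) - i < (f : Int)) :
    skipGoB lines f i = skipLoopA lines i 1 := by
  induction f generalizing i with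
  | zero =>
    simp only [skipGoB]
    rw [skipLoopA_of_ge lines i 1 (by push_cast at hf; omega)]
  | succ f ih =>
    by_cases hi : i < (lines.length : Int)
    · cases hg : PySem.List.pyGet? lines i with
      | none =>
        simp only [skipGoB, if_pos hi, hg]
        rw [skipLoopA_step_none lines i 1 ⟨hi, by omega⟩ hg]
      | some s =>
        simp only [skipGoB, if_pos hi, hg]
        rw [skipLoopA_step_some lines i 1 s ⟨hi, by omega⟩ hg]
        by_cases h2 : PySem.Str.startswith (PySem.Str.strip s) "#endif" = true
        · have h1 : ¬ PySem.Str.startswith (PySem.Str.strip s) "#if" = true := by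
            intro hc
            rw [startswith_disj _ h2] at hc
            exact Bool.false_ne_true hc
          rw [if_pos h2, if_neg h1, if_pos h2, (by omega : (1 : Int) - 1 = 0),
              skipLoopA_of_nonpos lines (i + 1) 0 le_rfl]
        · rw [if_neg h2]
          by_cases h1 : PySem.Str.startswith (PySem.Str.strip s) "#if" = true
          · rw [if_pos h1, if_pos h1]
            have e1 : skipGoB lines f (i + 1) = skipLoopA lines (i + 1) 1 :=
              ih (i + 1) (by push_cast at hf ⊢; omega)
            have hj : i + 1 ≤ skipLoopA lines (i + 1) 1 := skipLoopA_ge lines (i + 1) 1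
            have e2 : skipGoB lines f (skipLoopA lines (i + 1) 1) =
                skipLoopA lines (skipLoopA lines (i + 1) 1) 1 :=
              ih (skipLoopA lines (i + 1) 1) (by push_cast at hf ⊢; omega)
            rw [e1, e2, ← skipLoopA_succ lines (i + 1) 1 (by omega)]
          · rw [if_neg h1, if_neg h1, if_neg h2]
            exact ih (i + 1) (by push_cast at hf ⊢; omega)
    · simp only [skipGoB, if_neg hi]
      rw [skipLoopA_of_ge lines i 1 (by omega)]

-- ===== VERDICT (by name: the statement is the Claim_ definition above) =====
theorem skip_to_endif_py_spec : Claim_equal_skip_to_endif_py := by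
  intro lines start_idx _ hpre
  unfold Spec_skip_to_endif_py skip_to_endif_py skip_to_endif_py_alt
  rw [skipGoB_eq]
  unfold Pre_skip_to_endif_py at hpre
  push_cast
  omega
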